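-- pv_equiv track=rewrite | github.com/KSolo0203/GeekBrainsPython | Lesson5/Seminar5/Task#3.py | GetIncreasingSequences
-- ===== SOURCE A (Python) =====
-- def GetIncreasingSequences(list,k):
--     necessary_numbers = [list[k]]
--     for i in range(k, len(list)):
--         if list[i] > necessary_numbers[-1]:
--             necessary_numbers.append(list[i])
--         else:
--             continue
--     if len(necessary_numbers) > 1:
--         return necessary_numbers
-- ===== SOURCE B (Python) =====
-- def GetIncreasingSequences(list, k):
--     sub = list[k:]
--     maxes = []
--     m = None
--     for x in sub:
--         m = x if m is None or x > m else m
--         maxes.append(m)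
--     result = sub[:1] + [x for prev, cur, x in zip(maxes, maxes[1:], sub[1:]) if cur > prev]
--     return result if len(result) > 1 else None
-- ===== Notes on version B (the rewrite author's own statement) =====
-- stated objective: alternative
-- what changed: A grows the output while scanning, comparing each element with the output's current last element; B first materializes list[k:] via a slice, builds a prefix-maximum table over it in one pass, and then selects the strict new-record positions from that table in a second zip pass.
-- intended difference: For negative in-range k whose prefix list[:k] contains an element larger than max(list[k:]), A wraps to the suffix start but then keeps scanning from index 0 through the whole list and appends those larger prefix elements (e.g. A([5,1],-1) = [1,5]); B reads k by Python slice semantics and returns only the greedy increasing run inside list[k:] (None for [5,1],-1), which is the intended 'run starting at index k'. — e.g. on GetIncreasingSequences([5, 1], -1): A returns some [1, 5], B returns none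
import Mathlib
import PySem

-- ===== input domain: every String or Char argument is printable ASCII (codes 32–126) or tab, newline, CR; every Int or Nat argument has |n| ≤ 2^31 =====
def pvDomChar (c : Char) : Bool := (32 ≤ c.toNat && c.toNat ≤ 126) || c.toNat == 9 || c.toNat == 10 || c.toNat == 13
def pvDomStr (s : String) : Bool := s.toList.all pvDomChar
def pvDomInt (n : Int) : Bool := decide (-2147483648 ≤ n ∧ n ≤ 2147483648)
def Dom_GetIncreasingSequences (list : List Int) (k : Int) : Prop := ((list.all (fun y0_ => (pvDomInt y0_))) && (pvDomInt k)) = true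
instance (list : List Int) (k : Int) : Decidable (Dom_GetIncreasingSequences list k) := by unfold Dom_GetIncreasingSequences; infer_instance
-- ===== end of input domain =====

-- B replaces A's running scan against the output's last element by a prefix-maximum table
-- over list[k:] plus a record-selection pass (objective: alternative decomposition; not faster).
-- For negative in-range k, B interprets k by Python slice semantics (intended), while A
-- additionally rescans the whole list from index 0 (see D_ below).

-- ===== PORT A =====
def GetIncreasingSequences (list : List Int) (k : Int) : Option (List Int) :=
  match PySem.List.pyGet? list k with
  | none => none  -- Python raises IndexError here (outside Pre_)
  | some v =>
    let nn := (PySem.List.pyRange k (list.length : Int) 1).foldl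
      (fun acc i =>
        if PySem.List.pyGetD acc (-1) 0 < PySem.List.pyGetD list i 0 then
          acc ++ [PySem.List.pyGetD list i 0]
        else acc) [v]
    if 1 < nn.length then some nn else none

-- ===== PORT B =====
def GetIncreasingSequences_alt (list : List Int) (k : Int) : Option (List Int) :=
  let sub := PySem.List.slice list (some k) none
  let mp := sub.foldl
      (fun (p : List Int × Option Int) x =>
        let m := match p.2 with
          | none => x
          | some m0 => if m0 < x then x else m0
        (p.1 ++ [m], some m)) (([] : List Int), (none : Option Int))
  let maxes := mp.1
  let result := PySem.List.slice sub none (some 1) ++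
    ((maxes.zip ((PySem.List.slice maxes (some 1) none).zip
        (PySem.List.slice sub (some 1) none))).filterMap
      (fun t => if t.1 < t.2.1 then some t.2.2 else none))
  if 1 < result.length then some result else none

-- ===== PRECONDITION & SPEC =====
-- Pre_ excludes exactly the inputs where A raises IndexError (k out of Python index range).
def Pre_GetIncreasingSequences (list : List Int) (k : Int) : Prop :=
  -(list.length : Int) ≤ k ∧ k < (list.length : Int)
instance (list : List Int) (k : Int) : Decidable (Pre_GetIncreasingSequences list k) := by
  unfold Pre_GetIncreasingSequences; infer_instance
def pvWitness_GetIncreasingSequences : List Int × Int := ([1, 2], 0)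

-- For negative in-range k whose prefix list[:k] contains an element exceeding max(list[k:]),
-- A wraps to the suffix start but then keeps scanning from index 0 over the whole list and
-- appends those larger prefix elements; B returns only the greedy increasing run inside
-- list[k:] (Python slice reading of "start at index k"), which is the intended behaviour.
def D_GetIncreasingSequences (list : List Int) (k : Int) : Prop :=
  k < 0 ∧ -(list.length : Int) ≤ k ∧
    ∃ x ∈ list, ∀ y ∈ list.drop ((list.length : Int) + k).toNat, y < x
instance (list : List Int) (k : Int) : Decidable (D_GetIncreasingSequences list k) := by
  unfold D_GetIncreasingSequences; infer_instance

def Spec_GetIncreasingSequences (list : List Int) (k : Int) (out : Option (List Int)) : Prop :=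
  ¬ D_GetIncreasingSequences list k → out = GetIncreasingSequences_alt list k
instance (list : List Int) (k : Int) (out : Option (List Int)) :
    Decidable (Spec_GetIncreasingSequences list k out) := by
  unfold Spec_GetIncreasingSequences; infer_instance

def pvDiffWitness_GetIncreasingSequences : List Int × Int := ([5, 1], -1)
def pvDiffWitnessOut_GetIncreasingSequences : (Option (List Int)) × (Option (List Int)) :=
  (some [1, 5], none)

-- ===== CLAIM (what is proved, stated in full; the proofs are below) =====
def Claim_unchanged_GetIncreasingSequences : Prop := ∀ (list : List Int) (k : Int), Dom_GetIncreasingSequences list k → Pre_GetIncreasingSequences list k → Spec_GetIncreasingSequences list k (GetIncreasingSequences list k)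
def Claim_changed_GetIncreasingSequences : Prop := Dom_GetIncreasingSequences (pvDiffWitness_GetIncreasingSequences.1) (pvDiffWitness_GetIncreasingSequences.2) ∧ Pre_GetIncreasingSequences (pvDiffWitness_GetIncreasingSequences.1) (pvDiffWitness_GetIncreasingSequences.2) ∧ D_GetIncreasingSequences (pvDiffWitness_GetIncreasingSequences.1) (pvDiffWitness_GetIncreasingSequences.2) ∧ GetIncreasingSequences (pvDiffWitness_GetIncreasingSequences.1) (pvDiffWitness_GetIncreasingSequences.2) = pvDiffWitnessOut_GetIncreasingSequences.1 ∧ GetIncreasingSequences_alt (pvDiffWitness_GetIncreasingSequences.1) (pvDiffWitness_GetIncreasingSequences.2) = pvDiffWitnessOut_GetIncreasingSequences.2 ∧ pvDiffWitnessOut_GetIncreasingSequences.1 ≠ pvDiffWitnessOut_GetIncreasingSequences.2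
def Claim_exact_GetIncreasingSequences : Prop := ∀ (list : List Int) (k : Int), Dom_GetIncreasingSequences list k → Pre_GetIncreasingSequences list k → D_GetIncreasingSequences list k → GetIncreasingSequences list k ≠ GetIncreasingSequences_alt list k

-- ===== LEMMAS AND PROOFS =====
def recAbove : Int → List Int → List Int
  | _, [] => []
  | m, x :: t => if m < x then x :: recAbove x t else recAbove m t
def scanMax : Int → List Int → List Int
  | _, [] => []
  | m, x :: t => (if m < x then x else m) :: scanMax (if m < x then x else m) t
def runMax : Int → List Int → Int
  | m, [] => m
  | m, x :: t => runMax (if m < x then x else m) t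
def stepA (acc : List Int) (e : Int) : List Int :=
  if PySem.List.pyGetD acc (-1) 0 < e then acc ++ [e] else acc
def stepB (p : List Int × Option Int) (x : Int) : List Int × Option Int :=
  let m := match p.2 with
    | none => x
    | some m0 => if m0 < x then x else m0
  (p.1 ++ [m], some m)

lemma foldA (xs : List Int) : ∀ (pre : List Int) (m : Int),
    xs.foldl stepA (pre ++ [m]) = pre ++ [m] ++ recAbove m xs := by
  induction xs with
  | nil => intro pre m; simp [recAbove]
  | cons x t ih =>
    intro pre m
    simp only [List.foldl_cons, recAbove]
    have hs : stepA (pre ++ [m]) x = if m < x then (pre ++ [m]) ++ [x] else pre ++ [m] := by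
      simp [stepA, PySem.List.pyGetD_neg_one_append_singleton]
    by_cases h : m < x
    · rw [hs, if_pos h, if_pos h, ih (pre ++ [m]) x]; simp
    · rw [hs, if_neg h, if_neg h, ih pre m]

lemma recAbove_append (xs ys : List Int) : ∀ m : Int,
    recAbove m (xs ++ ys) = recAbove m xs ++ recAbove (runMax m xs) ys := by
  induction xs with
  | nil => intro m; simp [recAbove, runMax]
  | cons x t ih =>
    intro m
    simp only [List.cons_append, recAbove, runMax]
    by_cases h : m < x
    · rw [if_pos h, if_pos h, ih x]; simp [h]
    · rw [if_neg h, if_neg h, ih m]; simp [h]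

lemma le_runMax (xs : List Int) : ∀ m : Int, m ≤ runMax m xs := by
  induction xs with
  | nil => intro m; simp [runMax]
  | cons x t ih =>
    intro m
    simp only [runMax]
    by_cases h : m < x
    · rw [if_pos h]; exact le_trans (le_of_lt h) (ih x)
    · rw [if_neg h]; exact ih m

lemma mem_le_runMax (xs : List Int) : ∀ (m : Int), ∀ y ∈ xs, y ≤ runMax m xs := by
  induction xs with
  | nil => intro m y hy; simp at hy
  | cons x t ih =>
    intro m y hy
    simp only [runMax]
    rcases List.mem_cons.mp hy with rfl | hy
    · by_cases h : m < y
      · rw [if_pos h]; exact le_runMax t y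
      · rw [if_neg h]; have := le_runMax t m; omega
    · exact ih _ y hy

lemma runMax_mem (xs : List Int) : ∀ m : Int, runMax m xs = m ∨ runMax m xs ∈ xs := by
  induction xs with
  | nil => intro m; simp [runMax]
  | cons x t ih =>
    intro m
    simp only [runMax]
    rcases ih (if m < x then x else m) with h | h
    · rw [h]; split
      · exact Or.inr (List.mem_cons_self ..)
      · exact Or.inl rfl
    · exact Or.inr (List.mem_cons_of_mem _ h)

lemma recAbove_eq_nil (ys : List Int) : ∀ m : Int, (∀ y ∈ ys, y ≤ m) → recAbove m ys = [] := by
  induction ys with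
  | nil => intro m _; simp [recAbove]
  | cons x t ih =>
    intro m h
    have hx : x ≤ m := h x (List.mem_cons_self ..)
    simp only [recAbove, if_neg (by omega : ¬ m < x)]
    exact ih m (fun y hy => h y (List.mem_cons_of_mem _ hy))

lemma recAbove_ne_nil (ys : List Int) : ∀ (m x : Int), x ∈ ys → m < x → recAbove m ys ≠ [] := by
  induction ys with
  | nil => intro m x hx; simp at hx
  | cons z t ih =>
    intro m x hx hlt
    simp only [recAbove]
    by_cases h : m < z
    · simp [h]
    · rw [if_neg h]
      rcases List.mem_cons.mp hx with rfl | hx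
      · omega
      · exact ih m x hx hlt

lemma foldB (t : List Int) : ∀ (acc : List Int) (m : Int),
    t.foldl stepB (acc, some m) = (acc ++ scanMax m t, some (runMax m t)) := by
  induction t with
  | nil => intro acc m; simp [scanMax, runMax]
  | cons x r ih =>
    intro acc m
    have hs : stepB (acc, some m) x = (acc ++ [if m < x then x else m], some (if m < x then x else m)) := rfl
    rw [List.foldl_cons, hs, ih]
    simp [scanMax, runMax]

lemma zipsel (t : List Int) : ∀ v : Int,
    ((v :: scanMax v t).zip ((scanMax v t).zip t)).filterMap
      (fun p => if p.1 < p.2.1 then some p.2.2 else none) = recAbove v t := by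
  induction t with
  | nil => intro v; simp [scanMax, recAbove]
  | cons x r ih =>
    intro v
    simp only [scanMax, recAbove]
    by_cases h : v < x
    · simp only [if_pos h, List.zip_cons_cons, List.filterMap_cons]
      rw [ih x]
    · simp only [if_neg h, List.zip_cons_cons, List.filterMap_cons]
      rw [if_neg (lt_irrefl v)]
      exact ih v

-- B's value on any in-range k, via the drop-index a of the slice
lemma alt_eval (list : List Int) (k : Int) (a : Nat)
    (hs : PySem.List.slice list (some k) none = list.drop a) (ha : a < list.length) :
    GetIncreasingSequences_alt list k =
      (if 1 < (list[a] :: recAbove list[a] (list.drop (a + 1))).length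
       then some (list[a] :: recAbove list[a] (list.drop (a + 1))) else none) := by
  have hd : list.drop a = list[a] :: list.drop (a + 1) := List.drop_eq_getElem_cons ha
  simp only [GetIncreasingSequences_alt]
  rw [hs, hd]
  rw [show (fun (p : List Int × Option Int) x =>
        let m := match p.2 with
          | none => x
          | some m0 => if m0 < x then x else m0
        (p.1 ++ [m], some m)) = stepB from rfl]
  rw [List.foldl_cons]
  rw [show stepB (([] : List Int), (none : Option Int)) list[a] = ([list[a]], some list[a]) from rfl]
  rw [foldB]
  simp only [List.singleton_append]
  have htake := PySem.List.slice_to (list[a] :: list.drop (a + 1)) (b := 1) (by norm_num)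
  rw [PySem.List.slice_from_one, PySem.List.slice_from_one, htake]
  simp only [List.tail_cons, Int.toNat_one, List.take_succ_cons, List.take_zero]
  rw [zipsel]
  simp

-- A's value for 0 ≤ k < len
lemma a_eval_nonneg (list : List Int) (k : Int) (h0 : 0 ≤ k) (h1 : k < (list.length : Int)) :
    GetIncreasingSequences list k =
      (if 1 < (list[k.toNat]'(by omega) :: recAbove (list[k.toNat]'(by omega)) (list.drop (k.toNat + 1))).length
       then some (list[k.toNat]'(by omega) :: recAbove (list[k.toNat]'(by omega)) (list.drop (k.toNat + 1))) else none) := by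
  have hv := PySem.List.pyGet?_eq_some_getElem list (i := k) h0 h1
  simp only [GetIncreasingSequences, hv]
  rw [show (fun (acc : List Int) i =>
        if PySem.List.pyGetD acc (-1) 0 < PySem.List.pyGetD list i 0 then
          acc ++ [PySem.List.pyGetD list i 0] else acc)
      = (fun acc i => stepA acc (PySem.List.pyGetD list i 0)) from rfl]
  rw [PySem.List.foldl_pyRange_pyGetD' list 0 stepA _ h0]
  have hd : list.drop k.toNat = list[k.toNat]'(by omega) :: list.drop (k.toNat + 1) :=
    List.drop_eq_getElem_cons (by omega)
  rw [hd]
  rw [show ([list[k.toNat]'(by omega)] : List Int) = [] ++ [list[k.toNat]'(by omega)] from rfl, foldA]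
  simp only [List.nil_append]
  rw [show recAbove (list[k.toNat]'(by omega)) ((list[k.toNat]'(by omega)) :: list.drop (k.toNat + 1))
      = recAbove (list[k.toNat]'(by omega)) (list.drop (k.toNat + 1)) from by simp [recAbove]]
  simp

-- a fold of A's loop body over the negative half of the index range fetches the suffix elements
lemma fold_pyRange_neg (list : List Int) (j : Nat) (h0 : 0 < j) (h1 : j ≤ list.length)
    (init : List Int) :
    (PySem.List.pyRange (-(j : Int)) 0 1).foldl
        (fun acc i => stepA acc (PySem.List.pyGetD list i 0)) init
      = (list.drop (list.length - j)).foldl stepA init := by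
  have key := PySem.List.foldl_pyRange_pyGetD' list 0 stepA init
        (a := ((list.length - j : Nat) : Int)) (by positivity)
  rw [Int.toNat_natCast] at key
  rw [← key]
  rw [PySem.List.pyRange_one (-(j : Int)) 0,
      PySem.List.pyRange_one ((list.length - j : Nat) : Int) (list.length : Int)]
  have hj1 : ((0 : Int) - -(j : Int)).toNat = j := by omega
  have hj2 : ((list.length : Int) - ((list.length - j : Nat) : Int)).toNat = j := by
    have : ((list.length - j : Nat) : Int) = (list.length : Int) - (j : Int) := by
      push_cast [Nat.cast_sub h1]; ring
    omega
  rw [hj1, hj2]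
  rw [List.foldl_map, List.foldl_map]
  apply PySem.List.foldl_congr_mem
  intro acc x hx
  have hxj : x < j := List.mem_range.mp hx
  have hm : (-(j : Int) + (x : Int)) = -(((j - x : Nat)) : Int) := by
    push_cast [Nat.cast_sub (le_of_lt hxj)]; ring
  rw [hm, PySem.List.pyGetD_neg_natCast list (j - x) 0 (by omega) (by omega)]
  have hi0 : (0 : Int) ≤ ((list.length - j : Nat) : Int) + (x : Int) := by positivity
  have hi1 : ((list.length - j : Nat) : Int) + (x : Int) < (list.length : Int) := by
    push_cast [Nat.cast_sub h1]; omega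
  rw [PySem.List.pyGetD_eq_getElem list 0 hi0 hi1]
  have hidx : (((list.length - j : Nat) : Int) + (x : Int)).toNat = list.length - (j - x) := by omega
  simp only [hidx]

-- A's value for in-range negative k = -(j : Nat)
lemma a_eval_neg (list : List Int) (j : Nat) (h0 : 0 < j) (h1 : j ≤ list.length) :
    GetIncreasingSequences list (-(j : Int)) =
      (if 1 < ((list[list.length - j]'(by omega)) ::
              (recAbove (list[list.length - j]'(by omega)) (list.drop (list.length - j + 1)) ++
               recAbove (runMax (list[list.length - j]'(by omega)) (list.drop (list.length - j))) list)).length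
       then some ((list[list.length - j]'(by omega)) ::
              (recAbove (list[list.length - j]'(by omega)) (list.drop (list.length - j + 1)) ++
               recAbove (runMax (list[list.length - j]'(by omega)) (list.drop (list.length - j))) list))
       else none) := by
  have hv := PySem.List.pyGet?_neg_natCast list j h0 h1
  have hv2 : list[list.length - j]? = some (list[list.length - j]'(by omega)) :=
    List.getElem?_eq_getElem (by omega)
  simp only [GetIncreasingSequences, hv, hv2]
  rw [show (fun (acc : List Int) i =>
        if PySem.List.pyGetD acc (-1) 0 < PySem.List.pyGetD list i 0 then
          acc ++ [PySem.List.pyGetD list i 0] else acc)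
      = (fun acc i => stepA acc (PySem.List.pyGetD list i 0)) from rfl]
  rw [PySem.List.pyRange_one_append (-(j : Int)) 0 (list.length : Int) (by omega) (by positivity)]
  rw [List.foldl_append]
  rw [fold_pyRange_neg list j h0 h1]
  rw [PySem.List.foldl_pyRange_pyGetD' list 0 stepA _ (a := 0) le_rfl]
  simp only [Int.toNat_zero, List.drop_zero]
  rw [← List.foldl_append]
  rw [show ([list[list.length - j]'(by omega)] : List Int)
      = [] ++ [list[list.length - j]'(by omega)] from rfl, foldA]
  simp only [List.nil_append]
  rw [recAbove_append]
  have hd : list.drop (list.length - j)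
      = (list[list.length - j]'(by omega)) :: list.drop (list.length - j + 1) :=
    List.drop_eq_getElem_cons (by omega)
  rw [show recAbove (list[list.length - j]'(by omega)) (list.drop (list.length - j))
      = recAbove (list[list.length - j]'(by omega)) (list.drop (list.length - j + 1)) from by
        rw [hd]; simp [recAbove]]
  simp

-- ===== VERDICT (by name: the statement is the Claim_ definition above) =====
theorem GetIncreasingSequences_spec : Claim_unchanged_GetIncreasingSequences := by
  intro list k hdom hpre hnd
  obtain ⟨hlo, hhi⟩ := hpre
  by_cases hk : 0 ≤ k
  · have ha : k.toNat < list.length := by omega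
    rw [a_eval_nonneg list k hk hhi,
        alt_eval list k k.toNat (PySem.List.slice_from list hk) ha]
  · have hkneg : k < 0 := by omega
    have hj : k = -(((-k).toNat : Nat) : Int) := by omega
    set j := (-k).toNat with hjdef
    have h0j : 0 < j := by omega
    have h1j : j ≤ list.length := by omega
    rw [hj, a_eval_neg list j h0j h1j,
        alt_eval list (-(j : Int)) (list.length - j)
          (PySem.List.slice_from_neg_natCast list j h0j) (by omega)]
    have hnil : recAbove
        (runMax (list[list.length - j]'(by omega)) (list.drop (list.length - j))) list = [] := by
      apply recAbove_eq_nil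
      intro x hx
      unfold D_GetIncreasingSequences at hnd
      push Not at hnd
      have hdrop : ((list.length : Int) + k).toNat = list.length - j := by omega
      obtain ⟨y, hy, hxy⟩ := hnd hkneg (by omega) x hx
      rw [hdrop] at hy
      exact le_trans hxy (mem_le_runMax _ _ y hy)
    rw [hnil]
    simp

theorem GetIncreasingSequences_changed : Claim_changed_GetIncreasingSequences := by
  unfold Claim_changed_GetIncreasingSequences; decide

theorem GetIncreasingSequences_tight : Claim_exact_GetIncreasingSequences := by
  intro list k hdom hpre hD
  obtain ⟨hkneg, hklo, x, hx, hall⟩ := hD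
  obtain ⟨hlo, hhi⟩ := hpre
  have hj : k = -(((-k).toNat : Nat) : Int) := by omega
  set j := (-k).toNat with hjdef
  have h0j : 0 < j := by omega
  have h1j : j ≤ list.length := by omega
  have haj : list.length - j < list.length := by omega
  rw [hj, a_eval_neg list j h0j h1j,
      alt_eval list (-(j : Int)) (list.length - j)
        (PySem.List.slice_from_neg_natCast list j h0j) (by omega)]
  have hdrop : ((list.length : Int) + k).toNat = list.length - j := by omega
  rw [hdrop] at hall
  have hvmem : (list[list.length - j]'haj) ∈ list.drop (list.length - j) := by
    rw [List.drop_eq_getElem_cons haj]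
    exact List.mem_cons_self ..
  have hMlt : runMax (list[list.length - j]'haj) (list.drop (list.length - j)) < x := by
    rcases runMax_mem (list.drop (list.length - j)) (list[list.length - j]'haj) with h | h
    · rw [h]; exact hall _ hvmem
    · exact hall _ h
  have hne := recAbove_ne_nil list _ x hx hMlt
  have hr2 : (recAbove (runMax (list[list.length - j]'haj)
      (list.drop (list.length - j))) list).length ≠ 0 := by
    intro h
    exact hne (List.eq_nil_of_length_eq_zero h)
  rw [if_pos (by simp; omega)]
  by_cases hb : 1 < ((list[list.length - j]'haj) ::
      recAbove (list[list.length - j]'haj) (list.drop (list.length - j + 1))).length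
  · rw [if_pos hb]
    intro hcontra
    simp only [Option.some.injEq, List.cons.injEq] at hcontra
    have h2 := congrArg List.length hcontra.2
    rw [List.length_append] at h2
    omega
  · rw [if_neg hb]
    simp
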